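-- pv_equiv track=rewrite | github.com/julianespinel/lab | python/benchmark-and-profiling/mini_max_sum.py | solve_n
-- ===== SOURCE A (Python) =====
-- def solve_n(arr):
--     min_element = arr[0]
--     max_element = arr[0]
--     sum_arr = 0
--     for element in arr:
--         sum_arr += element
--         if element < min_element:
--             min_element = element
--         if element > max_element:
--             max_element = element
--     return (sum_arr - max_element, sum_arr - min_element)
-- ===== SOURCE B (Python) =====
-- def solve_n(arr):
--     total = sum(arr)
--     s = sorted(arr)
--     return (total - s[-1], total - s[0])
-- ===== Notes on version B (the rewrite author's own statement) =====
-- stated objective: simpler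
-- what changed: Replaces the fused manual min/max/sum tracking loop with sum(arr) plus sorted(arr), reading the minimum and maximum from the sorted list's endpoints.
import Mathlib
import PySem

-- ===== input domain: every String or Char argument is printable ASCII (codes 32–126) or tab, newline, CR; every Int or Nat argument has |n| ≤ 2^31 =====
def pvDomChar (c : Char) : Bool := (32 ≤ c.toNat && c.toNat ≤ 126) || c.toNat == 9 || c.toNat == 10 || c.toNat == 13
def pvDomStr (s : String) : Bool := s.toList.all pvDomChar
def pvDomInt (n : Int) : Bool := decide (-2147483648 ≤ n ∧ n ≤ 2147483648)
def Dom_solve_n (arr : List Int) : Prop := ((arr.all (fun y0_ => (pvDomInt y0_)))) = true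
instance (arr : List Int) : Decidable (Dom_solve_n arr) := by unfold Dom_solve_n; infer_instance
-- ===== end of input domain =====

-- B replaces A's fused min/max/sum loop by sum(arr) + sorted(arr) with endpoint reads (objective: simpler).

-- ===== PORT A =====
-- state = (min_element, max_element, sum_arr), exactly A's three loop variables
def solve_n (arr : List Int) : Int × Int :=
  match PySem.List.pyGet? arr 0 with
  | none => (0, 0)   -- arr[0] raises IndexError on []; excluded by Pre_
  | some a0 =>
    let st := arr.foldl
      (fun (st : Int × Int × Int) element =>
        (if element < st.1 then element else st.1,
         if element > st.2.1 then element else st.2.1,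
         st.2.2 + element))
      (a0, a0, 0)
    (st.2.2 - st.2.1, st.2.2 - st.1)

-- ===== PORT B =====
def solve_n_alt (arr : List Int) : Int × Int :=
  let total := arr.sum
  let s := PySem.List.sorted arr (fun x => x) false
  match PySem.List.pyGet? s (-1), PySem.List.pyGet? s 0 with
  | some mx, some mn => (total - mx, total - mn)
  | _, _ => (0, 0)   -- s[-1] raises IndexError on []; excluded by Pre_

-- ===== PRECONDITION & SPEC =====
-- Pre_ excludes only the empty list, on which both Pythons raise IndexError.
def Pre_solve_n (arr : List Int) : Prop := arr ≠ []
instance (arr : List Int) : Decidable (Pre_solve_n arr) := by unfold Pre_solve_n; infer_instance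
def pvWitness_solve_n : List Int := ([3, -1, 4])
def Spec_solve_n (arr : List Int) (out : Int × Int) : Prop := out = solve_n_alt arr
instance (arr : List Int) (out : Int × Int) : Decidable (Spec_solve_n arr out) := by unfold Spec_solve_n; infer_instance

-- ===== CLAIM (what is proved, stated in full; the proofs are below) =====
def Claim_equal_solve_n : Prop := ∀ (arr : List Int), Dom_solve_n arr → Pre_solve_n arr → Spec_solve_n arr (solve_n arr)

-- ===== LEMMAS AND PROOFS =====

-- A's fold computes its three components independently
theorem foldA_split (l : List Int) (mn mx s : Int) :
    l.foldl
      (fun (st : Int × Int × Int) element =>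
        (if element < st.1 then element else st.1,
         if element > st.2.1 then element else st.2.1,
         st.2.2 + element))
      (mn, mx, s)
    = (l.foldl (fun m e => if e < m then e else m) mn,
       l.foldl (fun m e => if e > m then e else m) mx,
       s + l.sum) := by
  induction l generalizing mn mx s with
  | nil => simp
  | cons h t ih => simp [List.foldl_cons, ih]; ring

theorem foldMin_spec (l : List Int) (a : Int) :
    (l.foldl (fun m e => if e < m then e else m) a) ∈ a :: l ∧
    ∀ y ∈ a :: l, l.foldl (fun m e => if e < m then e else m) a ≤ y := by
  induction l generalizing a with
  | nil => simp
  | cons h t ih =>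
    rcases ih (if h < a then h else a) with ⟨hm, hle⟩
    constructor
    · simp only [List.mem_cons, List.foldl_cons] at hm ⊢
      rcases hm with hm | hm
      · rw [hm]; split <;> simp
      · exact Or.inr (Or.inr hm)
    · intro y hy
      simp only [List.mem_cons] at hy
      rcases hy with rfl | rfl | hy
      · exact le_trans (hle _ (.head _)) (by split <;> omega)
      · exact le_trans (hle _ (.head _)) (by split <;> omega)
      · exact hle _ (List.mem_cons_of_mem _ hy)

theorem foldMax_spec (l : List Int) (a : Int) :
    (l.foldl (fun m e => if e > m then e else m) a) ∈ a :: l ∧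
    ∀ y ∈ a :: l, y ≤ l.foldl (fun m e => if e > m then e else m) a := by
  induction l generalizing a with
  | nil => simp
  | cons h t ih =>
    rcases ih (if h > a then h else a) with ⟨hm, hle⟩
    constructor
    · simp only [List.mem_cons, List.foldl_cons] at hm ⊢
      rcases hm with hm | hm
      · rw [hm]; split <;> simp
      · exact Or.inr (Or.inr hm)
    · intro y hy
      simp only [List.mem_cons] at hy
      rcases hy with rfl | rfl | hy
      · exact le_trans (by split <;> omega) (hle _ (.head _))
      · exact le_trans (by split <;> omega) (hle _ (.head _))
      · exact hle _ (List.mem_cons_of_mem _ hy)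

-- last element of a (≤)-pairwise list bounds every member from above
theorem le_getLast_of_pairwise (l : List Int) (hp : l.Pairwise (· ≤ ·)) (hne : l ≠ []) :
    ∀ y ∈ l, y ≤ l.getLast hne := by
  induction l with
  | nil => simp at hne
  | cons h t ih =>
    intro y hy
    simp only [List.mem_cons] at hy
    rcases hy with rfl | hy
    · cases t with
      | nil => simp
      | cons b tb =>
        have := (List.pairwise_cons.mp hp).1 _ (List.getLast_mem (l := b :: tb) (by simp))
        simpa [List.getLast_cons] using this
    · have ht : t ≠ [] := by rintro rfl; simp at hy
      have := ih (List.pairwise_cons.mp hp).2 ht y hy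
      simpa [List.getLast_cons ht] using this

theorem solve_n_eq (arr : List Int) (h : arr ≠ []) : solve_n arr = solve_n_alt arr := by
  obtain ⟨a, t, rfl⟩ := List.exists_cons_of_ne_nil h
  have hs : PySem.List.sorted (a :: t) (fun x => x) false ≠ [] := by
    simp [PySem.List.sorted_eq_nil_iff]
  obtain ⟨m, ts, hsort⟩ := List.exists_cons_of_ne_nil hs
  -- endpoints of the sorted list
  have hmemS : ∀ y, y ∈ m :: ts ↔ y ∈ a :: t := by
    intro y; rw [← hsort]; exact PySem.List.mem_sorted ..
  have hmin_le : ∀ y ∈ a :: t, m ≤ y := fun y hy =>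
    PySem.List.key_head_sorted_le _ _ hsort y hy
  have hpair : (m :: ts).Pairwise (· ≤ ·) := by
    have := PySem.List.sorted_pairwise (a :: t) (fun x => x)
    rwa [hsort] at this
  have hlast_ge : ∀ y ∈ m :: ts, y ≤ (m :: ts).getLast (by simp) :=
    le_getLast_of_pairwise _ hpair _
  have hlast_mem : (m :: ts).getLast (by simp) ∈ m :: ts := List.getLast_mem _
  -- A's fold values
  rcases foldMin_spec (a :: t) a with ⟨hmnMem, hmnLe⟩
  rcases foldMax_spec (a :: t) a with ⟨hmxMem, hmxGe⟩
  set mn := (a :: t).foldl (fun m e => if e < m then e else m) a with hmn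
  set mx := (a :: t).foldl (fun m e => if e > m then e else m) a with hmx
  have hmnMem' : mn ∈ a :: t := by
    simp only [List.mem_cons] at hmnMem ⊢; tauto
  have hmxMem' : mx ∈ a :: t := by
    simp only [List.mem_cons] at hmxMem ⊢; tauto
  -- min agreement
  have hm_eq : mn = m := by
    have h1 : mn ≤ m := hmnLe m (List.mem_cons_of_mem a ((hmemS m).mp (.head _)))
    have h2 : m ≤ mn := hmin_le mn hmnMem'
    omega
  -- max agreement
  have hx_eq : mx = (m :: ts).getLast (by simp) := by
    have h1 : (m :: ts).getLast (by simp) ≤ mx :=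
      hmxGe _ (List.mem_cons_of_mem a ((hmemS _).mp hlast_mem))
    have h2 : mx ≤ (m :: ts).getLast (by simp) :=
      hlast_ge mx ((hmemS mx).mpr hmxMem')
    omega
  -- assemble
  unfold solve_n solve_n_alt
  rw [hsort]
  simp only [PySem.List.pyGet?_zero_cons, PySem.List.pyGet?_neg_one,
    List.getLast?_eq_getLast_of_ne_nil (l := m :: ts) (by simp)]
  rw [foldA_split]
  simp only [← hmn, ← hmx, hm_eq, hx_eq]
  simp

-- ===== VERDICT (by name: the statement is the Claim_ definition above) =====
theorem solve_n_spec : Claim_equal_solve_n := by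
  intro arr _ hpre
  exact solve_n_eq arr hpre
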